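-- pv_equiv track=rewrite | github.com/ThomasB123/Python | Boggle/Testing and Development/longestCorrectTest.py | longestCorrect
-- ===== SOURCE A (Python) =====
-- def longestCorrect(correct):
--     length = len(correct)
--     if length == 0:
--         return "You didn't play any correct words."
--     out = "The longest word you played was:<br>"
--     if length == 1:
--         return out + "<br>" + str(correct[0]) + "<br>"
--     correct = sorted(correct,key=len)
--     if len(correct[-1]) != len(correct[-2]):
--         return out + "<br>" + str(correct[-1]) + "<br>"
--     out = "The longest words you played were:<br>"
--     out += "<br>" + str(correct[length-1])
--     counter = 2
--     while len(correct[-1]) == len(correct[length-counter]) and counter < length+1: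
--         out += "<br>" + str(correct[length-counter])
--         counter += 1
--     return out + "<br>"
-- ===== SOURCE B (Python) =====
-- def longestCorrect(correct):
--     if len(correct) == 0:
--         return "You didn't play any correct words."
--     L = max(len(w) for w in correct)
--     longest = [w for w in correct if len(w) == L]
--     if len(longest) == 1:
--         return "The longest word you played was:<br><br>" + str(longest[0]) + "<br>"
--     out = "The longest words you played were:<br>"
--     for w in reversed(longest):
--         out += "<br>" + str(w)
--     return out + "<br>"
-- ===== Notes on version B (the rewrite author's own statement) =====
-- stated objective: simpler
-- what changed: B drops A's sort and backward counter-while entirely: one max scan over word lengths, a filter for the tie class, and a join over the reversed tie class (stability of A's sort makes the reversed filter reproduce A's tie order).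
import Mathlib
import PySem

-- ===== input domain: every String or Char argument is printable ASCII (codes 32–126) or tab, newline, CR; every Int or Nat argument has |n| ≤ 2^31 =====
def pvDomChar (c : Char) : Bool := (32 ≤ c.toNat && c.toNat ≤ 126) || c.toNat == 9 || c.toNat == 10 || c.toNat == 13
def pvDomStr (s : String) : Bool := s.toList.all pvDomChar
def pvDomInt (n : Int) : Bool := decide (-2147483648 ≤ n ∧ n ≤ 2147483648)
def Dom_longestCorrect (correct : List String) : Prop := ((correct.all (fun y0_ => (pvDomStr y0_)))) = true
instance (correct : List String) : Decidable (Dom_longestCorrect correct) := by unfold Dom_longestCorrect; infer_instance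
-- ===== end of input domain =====

-- B replaces A's sort-then-backward-counter-walk by a single max scan plus a filter, joining ties from the
-- back of the original list (simpler; same output).

-- ===== PORT A =====
-- the 'while' loop of A: walks backwards from index length-counter while lengths match the last element's
def lcLoopA (s : List String) (length : Nat) (out : String) (counter : Int) : String :=
  if h : (PySem.Str.len (PySem.List.pyGetD s (-1) "") == PySem.Str.len (PySem.List.pyGetD s ((length : Int) - counter) "")) ∧ counter < (length : Int) + 1 then
    lcLoopA s length (out ++ "<br>" ++ PySem.List.pyGetD s ((length : Int) - counter) "") (counter + 1)
  else out
termination_by ((length : Int) + 1 - counter).toNat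
decreasing_by
  have := h.2; omega

def longestCorrect (correct : List String) : String :=
  let length := correct.length
  if length == 0 then "You didn't play any correct words."
  else
    let out := "The longest word you played was:<br>"
    if length == 1 then out ++ "<br>" ++ PySem.List.pyGetD correct 0 "" ++ "<br>"
    else
      let s := PySem.List.sorted correct (fun w => PySem.Str.len w)
      if PySem.Str.len (PySem.List.pyGetD s (-1) "") != PySem.Str.len (PySem.List.pyGetD s (-2) "") then
        out ++ "<br>" ++ PySem.List.pyGetD s (-1) "" ++ "<br>"
      else
        let out2 := "The longest words you played were:<br>"
        let out3 := out2 ++ "<br>" ++ PySem.List.pyGetD s ((length : Int) - 1) ""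
        lcLoopA s length out3 2 ++ "<br>"

-- ===== PORT B =====
def longestCorrect_alt (correct : List String) : String :=
  if correct.length == 0 then "You didn't play any correct words."
  else
    let L := (PySem.List.max? (correct.map PySem.Str.len) (fun x => x)).getD 0
    let longest := correct.filter (fun w => PySem.Str.len w == L)
    if longest.length == 1 then
      "The longest word you played was:<br><br>" ++ PySem.List.pyGetD longest 0 "" ++ "<br>"
    else
      let out := "The longest words you played were:<br>"
      let out := longest.reverse.foldl (fun acc w => acc ++ "<br>" ++ w) out
      out ++ "<br>"

-- ===== PRECONDITION & SPEC =====
def Spec_longestCorrect (correct : List String) (out : String) : Prop := out = longestCorrect_alt correct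
instance (correct : List String) (out : String) : Decidable (Spec_longestCorrect correct out) := by unfold Spec_longestCorrect; infer_instance

-- ===== CLAIM (what is proved, stated in full; the proofs are below) =====
def Claim_equal_longestCorrect : Prop := ∀ (correct : List String), Dom_longestCorrect correct → Spec_longestCorrect correct (longestCorrect correct)

-- ===== LEMMAS AND PROOFS =====

-- insertBy with a key-< test keeps the list key-sorted
theorem pv_insertBy_pairwise (key : String → Int) (x : String) (ys : List String)
    (h : ys.Pairwise (fun a b => key a ≤ key b)) :
    (PySem.List.insertBy (fun a b => decide (key a < key b)) x ys).Pairwise (fun a b => key a ≤ key b) := by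
  induction ys with
  | nil => simp [PySem.List.insertBy]
  | cons y ys ih =>
    rcases List.pairwise_cons.1 h with ⟨hy, ht⟩
    by_cases hlt : key x < key y
    · simp only [PySem.List.insertBy, hlt, decide_true, if_true]
      refine List.pairwise_cons.2 ⟨?_, h⟩
      intro z hz
      rcases List.mem_cons.1 hz with rfl | hz
      · exact le_of_lt hlt
      · exact le_trans (le_of_lt hlt) (hy z hz)
    · simp only [PySem.List.insertBy, hlt, decide_false, Bool.false_eq_true, if_false]
      refine List.pairwise_cons.2 ⟨?_, ih ht⟩
      intro z hz
      rcases (PySem.List.mem_insertBy _ _ _ _).1 hz with rfl | hz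
      · omega
      · exact hy z hz

-- stability on one key class: inserting x appends it to the end of its class
theorem pv_insertBy_filter (key : String → Int) (c : Int) (x : String) (ys : List String)
    (h : ys.Pairwise (fun a b => key a ≤ key b)) :
    (PySem.List.insertBy (fun a b => decide (key a < key b)) x ys).filter (fun y => key y == c)
      = ys.filter (fun y => key y == c) ++ (if key x == c then [x] else []) := by
  induction ys with
  | nil =>
    by_cases hxc : (key x == c) = true
    · simp [PySem.List.insertBy, List.filter, hxc]
    · simp [PySem.List.insertBy, List.filter, hxc]
  | cons y ys ih =>
    rcases List.pairwise_cons.1 h with ⟨hy, ht⟩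
    by_cases hlt : key x < key y
    · simp only [PySem.List.insertBy, hlt, decide_true, if_true]
      by_cases hxc : (key x == c) = true
      · have hxc' : key x = c := by simpa using hxc
        have hnil : List.filter (fun y => key y == c) (y :: ys) = [] := by
          apply List.filter_eq_nil_iff.2
          intro z hz
          rcases List.mem_cons.1 hz with rfl | hz
          · simp; omega
          · have := hy z hz; simp; omega
        rw [List.filter_cons_of_pos (by simpa using hxc), hnil]
        simp [hxc]
      · rw [List.filter_cons_of_neg (by simpa using hxc)]
        simp [hxc]
    · simp only [PySem.List.insertBy, hlt, decide_false, Bool.false_eq_true, if_false]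
      by_cases hyc : (key y == c) = true
      · simp only [List.filter_cons, hyc, if_true, ih ht]
        simp
      · simp only [List.filter_cons, hyc, Bool.false_eq_true, if_false, ih ht]

theorem pv_foldl_filter (key : String → Int) (c : Int) (xs : List String) :
    ∀ acc : List String, acc.Pairwise (fun a b => key a ≤ key b) →
    (xs.foldl (fun acc x => PySem.List.insertBy (fun a b => decide (key a < key b)) x acc) acc).filter (fun y => key y == c)
      = acc.filter (fun y => key y == c) ++ xs.filter (fun y => key y == c) := by
  induction xs with
  | nil => intro acc _; simp
  | cons x xs ih =>
    intro acc hacc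
    rw [List.foldl_cons, ih _ (pv_insertBy_pairwise key x acc hacc),
        pv_insertBy_filter key c x acc hacc, List.filter_cons]
    by_cases hxc : (key x == c) = true <;> simp [hxc]

-- the insertion sort is stable on each key class
theorem pv_sorted_filter (key : String → Int) (c : Int) (xs : List String) :
    (PySem.List.sorted xs key).filter (fun y => key y == c) = xs.filter (fun y => key y == c) := by
  rw [PySem.List.sorted_eq_foldl_insertBy, pv_foldl_filter key c xs [] (by simp)]
  simp

-- a key-sorted list whose keys are ≤ L splits as (keys < L) ++ (the class of L)
theorem pv_sorted_split_core (key : String → Int) (L : Int) (s : List String)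
    (hp : s.Pairwise (fun a b => key a ≤ key b)) (hle : ∀ w ∈ s, key w ≤ L) :
    ∃ u, s = u ++ s.filter (fun y => key y == L) ∧ ∀ w ∈ u, key w < L := by
  refine ⟨s.takeWhile (fun y => !(key y == L)), ?_, ?_⟩
  · have hall : ∀ w ∈ s.dropWhile (fun y => !(key y == L)), (key w == L) = true := by
      intro w hw
      cases hd : s.dropWhile (fun y => !(key y == L)) with
      | nil => rw [hd] at hw; simp at hw
      | cons a t =>
        have hne : s.dropWhile (fun y => !(key y == L)) ≠ [] := by rw [hd]; simp
        have ha : (fun y => !(key y == L)) ((s.dropWhile (fun y => !(key y == L))).head hne) = false :=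
          List.head_dropWhile_not _ hne
        have hh : (s.dropWhile (fun y => !(key y == L))).head hne = a := by simp [hd]
        rw [hh] at ha
        rw [hd] at hw
        simp at ha
        have hpv : (a :: t).Pairwise (fun a b => key a ≤ key b) := by
          have := hp.sublist (List.dropWhile_sublist (p := fun y => !(key y == L)) (l := s))
          rwa [hd] at this
        rcases List.mem_cons.1 hw with rfl | hw'
        · simp [ha]
        · have h1 := (List.pairwise_cons.1 hpv).1 w hw'
          have h2 : w ∈ s := (List.dropWhile_sublist _).subset (by rw [hd]; exact List.mem_cons_of_mem _ hw')
          have h3 := hle w h2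
          simp; omega
    have hfil : s.filter (fun y => key y == L) = s.dropWhile (fun y => !(key y == L)) := by
      conv_lhs => rw [← List.takeWhile_append_dropWhile (p := fun y => !(key y == L)) (l := s)]
      rw [List.filter_append, List.filter_eq_nil_iff.2 (by
        intro z hz
        have := List.mem_takeWhile_imp hz
        simp at this ⊢
        exact this), List.filter_eq_self.2 hall]
      simp
    rw [hfil, List.takeWhile_append_dropWhile]
  · intro w hw
    have h1 := List.mem_takeWhile_imp hw
    have h2 := hle w ((List.takeWhile_sublist _).subset hw)
    simp at h1
    omega

-- pyGetD at a valid non-negative index is getD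
theorem pv_pyGetD_nonneg {α : Type} (xs : List α) (i : Int) (d : α) (h0 : 0 ≤ i) (h1 : i < xs.length) :
    PySem.List.pyGetD xs i d = xs.getD i.toNat d := by
  simp [PySem.List.pyGetD, PySem.List.pyGet?, PySem.List.pyIdx?, h0, h1, List.getD]

-- pyGetD at a valid negative index wraps around
theorem pv_pyGetD_neg {α : Type} (xs : List α) (i : Int) (d : α) (h0 : i < 0) (h1 : -(xs.length : Int) ≤ i) :
    PySem.List.pyGetD xs i d = xs.getD ((xs.length : Int) + i).toNat d := by
  have hn : ¬ (0 ≤ i) := by omega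
  have he : xs.length - (-i).toNat = ((xs.length : Int) + i).toNat := by omega
  simp [PySem.List.pyGetD, PySem.List.pyGet?, PySem.List.pyIdx?, hn, h1, List.getD, he]

-- A's while loop over s = u ++ M collects the tail of M.reverse
theorem pv_lcLoopA_eq (u M : List String) (L : Int)
    (hu : ∀ w ∈ u, PySem.Str.len w < L) (hM : ∀ w ∈ M, PySem.Str.len w = L)
    (hMne : M ≠ []) :
    ∀ (n k : Nat), M.length + 1 - k = n → 2 ≤ k → k ≤ M.length + 1 → ∀ out : String,
      lcLoopA (u ++ M) (u.length + M.length) out (k : Int)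
        = (M.reverse.drop (k - 1)).foldl (fun acc w => acc ++ "<br>" ++ w) out := by
  have hMpos : 0 < M.length := List.length_pos_iff.2 hMne
  have hlen : (u ++ M).length = u.length + M.length := by simp
  have hlast : PySem.Str.len (PySem.List.pyGetD (u ++ M) (-1) "") = L := by
    rw [pv_pyGetD_neg _ _ _ (by omega) (by rw [hlen]; push_cast; omega)]
    rw [hlen]
    have hidx : (((u.length + M.length : Nat) : Int) + (-1)).toNat = u.length + (M.length - 1) := by omega
    rw [hidx]
    have hlt : u.length + (M.length - 1) < (u ++ M).length := by rw [hlen]; omega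
    rw [List.getD_eq_getElem _ _ hlt, List.getElem_append_right (by omega)]
    exact hM _ (List.getElem_mem _)
  intro n
  induction n with
  | zero =>
    intro k hn h2 hk out
    have hk' : k = M.length + 1 := by omega
    subst hk'
    rw [lcLoopA]
    rw [dif_neg]
    · rw [List.drop_eq_nil_of_le (by simp), List.foldl_nil]
    · rcases Nat.eq_zero_or_pos u.length with hu0 | hu0
      · intro hcon
        have := hcon.2
        omega
      · intro hcon
        have hidx : ((u.length + M.length : Nat) : Int) - ((M.length + 1 : Nat) : Int) = ((u.length - 1 : Nat) : Int) := by push_cast; omega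
        rw [hidx, pv_pyGetD_nonneg (u ++ M) ((u.length - 1 : Nat) : Int) "" (by omega) (by rw [hlen]; push_cast; omega)] at hcon
        have hlt : ((u.length - 1 : Nat) : Int).toNat < (u ++ M).length := by rw [hlen]; omega
        rw [List.getD_eq_getElem _ _ hlt] at hcon
        have hmem : (u ++ M)[((u.length - 1 : Nat) : Int).toNat]'hlt ∈ u := by
          rw [List.getElem_append_left (by omega)]
          exact List.getElem_mem _
        have hshort := hu _ hmem
        have hbeq := hcon.1
        rw [hlast] at hbeq
        have := beq_iff_eq.1 hbeq
        omega
  | succ m ih =>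
    intro k hn h2 hk out
    have hkM : k ≤ M.length := by omega
    rw [lcLoopA]
    have hidx : ((u.length + M.length : Nat) : Int) - ((k : Nat) : Int) = ((u.length + M.length - k : Nat) : Int) := by push_cast; omega
    have hval : PySem.List.pyGetD (u ++ M) (((u.length + M.length : Nat) : Int) - (k : Int)) "" = M[M.length - k]'(by omega) := by
      rw [hidx, pv_pyGetD_nonneg _ _ _ (by omega) (by rw [hlen]; push_cast; omega)]
      have hlt : ((u.length + M.length - k : Nat) : Int).toNat < (u ++ M).length := by rw [hlen]; omega
      rw [List.getD_eq_getElem _ _ hlt, List.getElem_append_right (by omega)]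
      congr 1
      omega
    rw [dif_pos]
    · have hrec := ih (k + 1) (by omega) (by omega) (by omega)
      push_cast at hrec
      rw [hval, hrec]
      have hdrop : M.reverse.drop (k - 1) = M[M.length - k]'(by omega) :: M.reverse.drop k := by
        have h1 : k - 1 < M.reverse.length := by simp; omega
        rw [List.drop_eq_getElem_cons h1]
        congr 1
        · rw [List.getElem_reverse]
          congr 1
          omega
        · congr 1
          omega
      rw [hdrop, List.foldl_cons]
    · constructor
      · rw [hval, hlast]
        have : PySem.Str.len (M[M.length - k]'(by omega)) = L := hM _ (List.getElem_mem _)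
        rw [this]
        simp
      · push_cast; omega

theorem pv_getD_split (u M : List String) (j : Nat) (hj : j < M.length) :
    (u ++ M).getD (u.length + j) "" = M[j]'hj := by
  rw [List.getD_eq_getElem _ _ (by simp only [List.length_append]; omega), List.getElem_append_right (by omega)]
  congr 1
  omega

-- ===== VERDICT (by name: the statement is the Claim_ definition above) =====
theorem longestCorrect_spec : Claim_equal_longestCorrect := by
  unfold Claim_equal_longestCorrect
  intro correct _
  unfold Spec_longestCorrect
  by_cases hne : correct = []
  · subst hne; rfl
  have hpos : 0 < correct.length := List.length_pos_iff.2 hne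
  -- B's maximum
  obtain ⟨m, hm⟩ : ∃ m, PySem.List.max? (correct.map PySem.Str.len) (fun x => x) = some m := by
    cases h : PySem.List.max? (correct.map PySem.Str.len) (fun x => x) with
    | none =>
      rw [PySem.List.max?_eq_none_iff] at h
      simp at h
      exact absurd h hne
    | some m => exact ⟨m, rfl⟩
  have hLval : (PySem.List.max? (correct.map PySem.Str.len) (fun x => x)).getD 0 = m := by rw [hm]; rfl
  have hLe : ∀ w ∈ correct, PySem.Str.len w ≤ m := by
    intro w hw
    exact PySem.List.max?_isMax hm _ (List.mem_map_of_mem hw)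
  have hLex : ∃ w ∈ correct, PySem.Str.len w = m := by
    have h := PySem.List.max?_mem hm
    rcases List.mem_map.1 h with ⟨w, hw, hwm⟩
    exact ⟨w, hw, hwm⟩
  obtain ⟨w0, hw0, hw0m⟩ := hLex
  have hMne : correct.filter (fun w => PySem.Str.len w == m) ≠ [] := by
    intro h
    have : w0 ∈ correct.filter (fun w => PySem.Str.len w == m) := List.mem_filter.2 ⟨hw0, beq_iff_eq.2 hw0m⟩
    rw [h] at this
    simp at this
  have hMpos : 0 < (correct.filter (fun w => PySem.Str.len w == m)).length := List.length_pos_iff.2 hMne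
  have hsp := PySem.List.sorted_pairwise correct (fun w => PySem.Str.len w)
  have hsle : ∀ w ∈ PySem.List.sorted correct (fun w => PySem.Str.len w), PySem.Str.len w ≤ m := by
    intro w hw
    exact hLe w ((PySem.List.mem_sorted correct (fun w => PySem.Str.len w) false w).1 hw)
  obtain ⟨u, hsu, hult⟩ := pv_sorted_split_core (fun w => PySem.Str.len w) m _ hsp hsle
  rw [pv_sorted_filter] at hsu
  have hMlen : ∀ w ∈ correct.filter (fun w => PySem.Str.len w == m), PySem.Str.len w = m := by
    intro w hw
    have := (List.mem_filter.1 hw).2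
    simpa using this
  have hslen : u.length + (correct.filter (fun w => PySem.Str.len w == m)).length = correct.length := by
    have := PySem.List.length_sorted correct (fun w => PySem.Str.len w) false
    rw [hsu] at this
    simpa using this
  simp only [longestCorrect, longestCorrect_alt, hLval]
  have h0 : (correct.length == 0) = false := by simp; omega
  rw [h0]
  simp only [Bool.false_eq_true, if_false]
  -- abbreviations
  have hv1 : PySem.List.pyGetD (PySem.List.sorted correct fun w => PySem.Str.len w) (-1) ""
      = (List.filter (fun w => PySem.Str.len w == m) correct)[(List.filter (fun w => PySem.Str.len w == m) correct).length - 1]'(by omega) := by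
    rw [hsu, pv_pyGetD_neg _ _ _ (by omega) (by simp only [List.length_append]; omega)]
    have : (((u ++ List.filter (fun y => PySem.Str.len y == m) correct).length : Int) + (-1)).toNat
        = u.length + ((List.filter (fun w => PySem.Str.len w == m) correct).length - 1) := by
      simp only [List.length_append]; omega
    rw [this, pv_getD_split]
  have hv1m : PySem.Str.len ((List.filter (fun w => PySem.Str.len w == m) correct)[(List.filter (fun w => PySem.Str.len w == m) correct).length - 1]'(by omega)) = m :=
    hMlen _ (List.getElem_mem _)
  by_cases h1 : correct.length = 1
  · -- singleton list
    have hMeq : List.filter (fun w => PySem.Str.len w == m) correct = correct :=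
      (List.filter_sublist).eq_of_length (by omega)
    have hc1 : (correct.length == 1) = true := by simp [h1]
    have hc2 : ((List.filter (fun w => PySem.Str.len w == m) correct).length == 1) = true := by
      rw [hMeq]; simp [h1]
    rw [hc1, hc2, if_pos rfl, if_pos rfl, hMeq]
    rw [show ("The longest word you played was:<br>" : String) ++ "<br>" = "The longest word you played was:<br><br>" from rfl]
  · -- at least two words
    have hn2 : 2 ≤ correct.length := by omega
    have hc1 : (correct.length == 1) = false := by simp; omega
    rw [hc1]
    simp only [Bool.false_eq_true, if_false]
    have hv2 : PySem.List.pyGetD (PySem.List.sorted correct fun w => PySem.Str.len w) (-2) ""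
        = (u ++ List.filter (fun y => PySem.Str.len y == m) correct).getD (correct.length - 2) "" := by
      rw [hsu, pv_pyGetD_neg _ _ _ (by omega) (by simp only [List.length_append]; push_cast; omega)]
      congr 1
      simp only [List.length_append]; omega
    by_cases hM1 : (List.filter (fun w => PySem.Str.len w == m) correct).length = 1
    · -- unique longest word
      have hu1 : 1 ≤ u.length := by omega
      have hv2' : (u ++ List.filter (fun y => PySem.Str.len y == m) correct).getD (correct.length - 2) ""
          = u[u.length - 1]'(by omega) := by
        rw [List.getD_eq_getElem _ _ (by simp only [List.length_append]; omega), List.getElem_append_left (by omega)]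
        congr 1
        omega
      have hlt := hult _ (List.getElem_mem (by omega : u.length - 1 < u.length))
      have hbne : (PySem.Str.len (PySem.List.pyGetD (PySem.List.sorted correct fun w => PySem.Str.len w) (-1) "")
          != PySem.Str.len (PySem.List.pyGetD (PySem.List.sorted correct fun w => PySem.Str.len w) (-2) "")) = true := by
        rw [hv1, hv2, hv2', hv1m]
        exact bne_iff_ne.2 (by omega)
      rw [hbne, if_pos rfl]
      have hcM : ((List.filter (fun w => PySem.Str.len w == m) correct).length == 1) = true := by rw [hM1]; decide
      rw [hcM, if_pos rfl]
      have hg0 : PySem.List.pyGetD (List.filter (fun w => PySem.Str.len w == m) correct) 0 ""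
          = (List.filter (fun w => PySem.Str.len w == m) correct)[0]'(by omega) := by
        rw [pv_pyGetD_nonneg _ _ _ (by omega) (by omega)]
        rw [List.getD_eq_getElem _ _ (by omega)]
        rfl
      rw [hv1, hg0]
      have : (List.filter (fun w => PySem.Str.len w == m) correct).length - 1 = 0 := by omega
      simp only [this]
      rw [show ("The longest word you played was:<br>" : String) ++ "<br>" = "The longest word you played was:<br><br>" from rfl]
    · -- several longest words
      have hM2 : 2 ≤ (List.filter (fun w => PySem.Str.len w == m) correct).length := by omega
      have hv2' : (u ++ List.filter (fun y => PySem.Str.len y == m) correct).getD (correct.length - 2) ""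
          = (List.filter (fun y => PySem.Str.len y == m) correct)[(List.filter (fun y => PySem.Str.len y == m) correct).length - 2]'(by omega) := by
        have : correct.length - 2 = u.length + ((List.filter (fun y => PySem.Str.len y == m) correct).length - 2) := by omega
        rw [this, pv_getD_split]
      have hbne : (PySem.Str.len (PySem.List.pyGetD (PySem.List.sorted correct fun w => PySem.Str.len w) (-1) "")
          != PySem.Str.len (PySem.List.pyGetD (PySem.List.sorted correct fun w => PySem.Str.len w) (-2) "")) = false := by
        rw [hv1, hv2, hv2', hv1m, hMlen _ (List.getElem_mem _)]
        simp
      rw [hbne]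
      simp only [Bool.false_eq_true, if_false]
      have hcM : ((List.filter (fun w => PySem.Str.len w == m) correct).length == 1) = false := by
        rw [beq_eq_false_iff_ne]
        omega
      rw [hcM]
      simp only [Bool.false_eq_true, if_false]
      -- the last sorted element
      have hvn : PySem.List.pyGetD (u ++ List.filter (fun y => PySem.Str.len y == m) correct) ((correct.length : Int) - 1) ""
          = (List.filter (fun w => PySem.Str.len w == m) correct)[(List.filter (fun w => PySem.Str.len w == m) correct).length - 1]'(by omega) := by
        rw [pv_pyGetD_nonneg _ _ _ (by omega) (by simp only [List.length_append]; push_cast; omega)]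
        have : ((correct.length : Int) - 1).toNat = u.length + ((List.filter (fun w => PySem.Str.len w == m) correct).length - 1) := by omega
        rw [this, pv_getD_split]
      -- run the loop
      have hloop := pv_lcLoopA_eq u (List.filter (fun w => PySem.Str.len w == m) correct) m hult hMlen hMne
        ((List.filter (fun w => PySem.Str.len w == m) correct).length - 1) 2 (by omega) (by omega) (by omega)
      simp only [Nat.cast_ofNat] at hloop
      rw [show (2 - 1 : Nat) = 1 from rfl] at hloop
      rw [hsu, hvn]
      have hlenrw : correct.length = u.length + (List.filter (fun w => PySem.Str.len w == m) correct).length := by omega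
      rw [hlenrw]
      -- B's fold peels its first element
      have hrev : (List.filter (fun w => PySem.Str.len w == m) correct).reverse
          = (List.filter (fun w => PySem.Str.len w == m) correct)[(List.filter (fun w => PySem.Str.len w == m) correct).length - 1]'(by omega)
            :: (List.filter (fun w => PySem.Str.len w == m) correct).reverse.drop 1 := by
        conv_lhs => rw [← List.drop_zero (l := (List.filter (fun w => PySem.Str.len w == m) correct).reverse)]
        rw [List.drop_eq_getElem_cons (by simp only [List.length_reverse]; omega)]
        congr 1
        rw [List.getElem_reverse]
        simp
      conv_rhs => rw [hrev]
      simp only [List.foldl_cons]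
      rw [hloop]
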